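-- pv_equiv track=rewrite | github.com/damianodantuono/trading | trading/Stock.py | market_position_generator
-- ===== SOURCE A (Python) =====
-- from collections import deque
--
-- def market_position_generator(enter_rule, exit_rule):
--     status = 0
--     market_positions = []
--     for i, j in zip(enter_rule, exit_rule):
--         if status == 0:
--             if i and not j:
--                 status = 1
--         else:
--             if j:
--                 status = 0
--         market_positions.append(status)
--     market_positions = deque(market_positions)
--     market_positions.rotate(1)
--     market_positions[0] = 0
--     return list(market_positions)
-- ===== SOURCE B (Python) =====
-- def _flat(pairs, acc):
--     # flat mode: emit 0 per step until an entry signal (enter and not exit)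
--     for p, (i, j) in enumerate(pairs):
--         if i and not j:
--             acc.append(1)
--             return _long(pairs[p + 1:], acc)
--         acc.append(0)
--     return acc
--
--
-- def _long(pairs, acc):
--     # long mode: emit 1 per step until an exit signal
--     for p, (i, j) in enumerate(pairs):
--         if j:
--             acc.append(0)
--             return _flat(pairs[p + 1:], acc)
--         acc.append(1)
--     return acc
--
--
-- def market_position_generator(enter_rule, exit_rule):
--     states = _flat(list(zip(enter_rule, exit_rule)), [])
--     return ([0] + states)[:-1]
-- ===== Notes on version B (the rewrite author's own statement) =====
-- stated objective: alternative
-- what changed: B replaces A's single fold over an integer status plus deque/rotate(1)/out[0]=0 post-processing by two mutually recursive mode functions (flat/long) over the zipped pairs, shifting by prepending 0 and dropping the last element.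
-- crash fix: On inputs where either list is empty A raises IndexError at market_positions[0]=0 while B returns []. — e.g. on market_position_generator([], [true]): A raises IndexError, B returns []
import Mathlib
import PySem

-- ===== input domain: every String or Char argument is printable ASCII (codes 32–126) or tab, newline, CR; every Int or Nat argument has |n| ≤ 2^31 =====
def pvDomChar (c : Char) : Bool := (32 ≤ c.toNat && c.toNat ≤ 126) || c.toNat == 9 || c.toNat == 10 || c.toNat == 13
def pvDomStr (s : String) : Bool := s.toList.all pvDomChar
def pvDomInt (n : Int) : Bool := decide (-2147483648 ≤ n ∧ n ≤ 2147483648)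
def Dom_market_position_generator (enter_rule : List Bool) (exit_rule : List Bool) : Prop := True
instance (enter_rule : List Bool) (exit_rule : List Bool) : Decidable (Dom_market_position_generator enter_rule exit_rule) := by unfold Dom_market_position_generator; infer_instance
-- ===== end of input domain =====

-- B replaces A's status-fold plus deque/rotate(1)/out[0]=0 by two mutually recursive mode
-- functions over the zipped pairs; return-value equivalence on non-empty zips (on an empty
-- zip A raises IndexError, B returns []).

-- ===== PORT A =====
-- the loop appending the NEW status after each transition
def mpgLoop : Int → List Bool → List Bool → List Int
  | _, [], _ => []
  | _, _, [] => []
  | status, i :: e, j :: x =>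
    let status' := if status = 0 then (if i = true ∧ j = false then 1 else status)
                   else (if j = true then 0 else status)
    status' :: mpgLoop status' e x

def market_position_generator (enter_rule : List Bool) (exit_rule : List Bool) : List Int :=
  let mp := mpgLoop 0 enter_rule exit_rule
  -- deque(mp).rotate(1): last element moves to the front
  let rotated := match mp with
    | [] => []
    | _ => mp.getLast! :: mp.dropLast
  -- rotated[0] = 0 (Python raises IndexError when rotated = []; excluded by Pre_)
  match rotated with
  | [] => []
  | _ :: t => 0 :: t

-- ===== PORT B =====
mutual
-- flat mode: emit 0 per step until an entry signal (enter and not exit)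
def mpgFlat : List (Bool × Bool) → List Int
  | [] => []
  | (i, j) :: rest => if i = true && j = false then 1 :: mpgLong rest else 0 :: mpgFlat rest
-- long mode: emit 1 per step until an exit signal
def mpgLong : List (Bool × Bool) → List Int
  | [] => []
  | (_, j) :: rest => if j then 0 :: mpgFlat rest else 1 :: mpgLong rest
end

def market_position_generator_alt (enter_rule : List Bool) (exit_rule : List Bool) : List Int :=
  (0 :: mpgFlat (enter_rule.zip exit_rule)).dropLast

-- ===== PRECONDITION & SPEC =====
-- Pre_ excludes exactly the inputs where the zip is empty: there A's
-- 'market_positions[0] = 0' raises IndexError.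
def Pre_market_position_generator (enter_rule : List Bool) (exit_rule : List Bool) : Prop :=
  enter_rule ≠ [] ∧ exit_rule ≠ []
instance (enter_rule : List Bool) (exit_rule : List Bool) : Decidable (Pre_market_position_generator enter_rule exit_rule) := by unfold Pre_market_position_generator; infer_instance
def pvWitness_market_position_generator : List Bool × List Bool := ([true, false], [false, true])

def Spec_market_position_generator (enter_rule : List Bool) (exit_rule : List Bool) (out : List Int) : Prop := out = market_position_generator_alt enter_rule exit_rule
instance (enter_rule : List Bool) (exit_rule : List Bool) (out : List Int) : Decidable (Spec_market_position_generator enter_rule exit_rule out) := by unfold Spec_market_position_generator; infer_instance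

-- On inputs with either list empty, A raises IndexError (from market_positions[0] = 0) while B returns [].
def Raises_market_position_generator (enter_rule : List Bool) (exit_rule : List Bool) : Prop :=
  enter_rule = [] ∨ exit_rule = []
instance (enter_rule : List Bool) (exit_rule : List Bool) : Decidable (Raises_market_position_generator enter_rule exit_rule) := by unfold Raises_market_position_generator; infer_instance
def pvRaiseWitness_market_position_generator : List Bool × List Bool := ([], [true])
def pvRaiseWitnessOut_market_position_generator : List Int := []

-- ===== CLAIM (what is proved, stated in full; the proofs are below) =====
def Claim_equal_market_position_generator : Prop := ∀ (enter_rule : List Bool) (exit_rule : List Bool), Dom_market_position_generator enter_rule exit_rule → Pre_market_position_generator enter_rule exit_rule → Spec_market_position_generator enter_rule exit_rule (market_position_generator enter_rule exit_rule)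
def Claim_raises_market_position_generator : Prop := (∀ (enter_rule : List Bool) (exit_rule : List Bool), Dom_market_position_generator enter_rule exit_rule → Raises_market_position_generator enter_rule exit_rule → ¬ Pre_market_position_generator enter_rule exit_rule) ∧ (Dom_market_position_generator (pvRaiseWitness_market_position_generator.1) (pvRaiseWitness_market_position_generator.2) ∧ Raises_market_position_generator (pvRaiseWitness_market_position_generator.1) (pvRaiseWitness_market_position_generator.2) ∧ market_position_generator_alt (pvRaiseWitness_market_position_generator.1) (pvRaiseWitness_market_position_generator.2) = pvRaiseWitnessOut_market_position_generator)

-- ===== LEMMAS AND PROOFS =====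

theorem mpgLoop_ne_nil (s : Int) (i j : Bool) (e x : List Bool) :
    mpgLoop s (i :: e) (j :: x) ≠ [] := by
  simp [mpgLoop]

-- B's mode functions compute exactly A's status sequence: mpgFlat matches status 0,
-- mpgLong matches status 1.
theorem modes_eq_loop (e : List Bool) : ∀ (x : List Bool),
    mpgFlat (e.zip x) = mpgLoop 0 e x ∧ mpgLong (e.zip x) = mpgLoop 1 e x := by
  induction e with
  | nil => intro x; simp [mpgFlat, mpgLong, mpgLoop]
  | cons i e ih =>
    intro x
    cases x with
    | nil => simp [mpgFlat, mpgLong, mpgLoop]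
    | cons j x =>
      obtain ⟨hf, hl⟩ := ih x
      constructor
      · cases i <;> cases j <;> simp [mpgFlat, mpgLoop, hf, hl]
      · cases j <;> simp [mpgLong, mpgLoop, hf, hl]

-- ===== VERDICT (by name: the statement is the Claim_ definition above) =====
theorem market_position_generator_spec : Claim_equal_market_position_generator := by
  intro e x _ hpre
  obtain ⟨he, hx⟩ := hpre
  unfold Spec_market_position_generator market_position_generator market_position_generator_alt
  rcases List.exists_cons_of_ne_nil he with ⟨i, e', rfl⟩
  rcases List.exists_cons_of_ne_nil hx with ⟨j, x', rfl⟩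
  rw [(modes_eq_loop _ _).1]
  have hne := mpgLoop_ne_nil 0 i j e' x'
  rcases List.exists_cons_of_ne_nil hne with ⟨a, l, hl⟩
  simp only [hl, List.dropLast_cons_of_ne_nil (List.cons_ne_nil a l)]

@[simp]
theorem market_position_generator_raises : Claim_raises_market_position_generator := by
  unfold Claim_raises_market_position_generator
  constructor
  · intro e x _ hr hpre
    rcases hr with h | h <;> [exact hpre.1 h; exact hpre.2 h]
  · exact ⟨trivial, by decide, by decide⟩
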